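-- pv_equiv track=rewrite | github.com/GermanPaul12/DataWhispers-Stock-Price-Prediction-Projekt-DHBW | Code/pages/4_🚀_Our_Products.py | wealth_distribution_prct
-- ===== SOURCE A (Python) =====
-- def wealth_distribution_prct(time, interest, risk):
--     risk_scale = {"1 (no risk)": 1,
--                   "2 (little risk)": 2,
--                   "3 (balanced risk)": 3,
--                   "4 (high risk high reward)": 4,
--                   "5 (I don't care if i loose everything)": 5}
--     risk = risk_scale[risk]
--     result = { # (id,Boolean)
--         (1 , 5 == risk and 6 <= time and interest > 10): (70, 10, 5, 5, 0, 10),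
--         (2 , 5 == risk and 6 <= time and True)         : (80, 10, 0, 10, 0, 0),
--         (3 , 5 == risk and 4 <= time and True)         : ( 0, 70,10,10,10,  0),
--         (4 , 5 == risk and True      and True)         : ( 0,100, 0, 0, 0,  0),
--         (5 , 4 <= risk and time > 10 and True)         : (70, 10, 0,20, 0,  0),
--         (6 , 4 <= risk and 6 <= time and True)         : (50, 20, 0,30, 0,  0),
--         (7 , 4 <= risk and 4 <= time and True)         : ( 0, 50, 0,50, 0,  0),
--         (8 , 4 <= risk and True      and True)         : ( 0,100, 0, 0, 0,  0),
--         (9 , 3 <= risk and 6 <= time and True)         : (50, 20, 0,30, 0,  0),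
--         (10, 3 <= risk and 4 <= time and True)         : (30, 30, 0,50, 0,  0),
--         (11, 3 <= risk and 3 <= time and True)         : ( 0, 70, 0,30, 0,  0),
--         (12, 3 <= risk and True      and True)         : ( 0,100, 0, 0, 0,  0),
--         (13, 2 <= risk and 10 < time and True)         : (20, 40, 0,40, 0,  0),
--         (14, True      and time >=1  and True)         : ( 0,100, 0, 0, 0,  0),
--         (15, True      and True      and True)         : ( 0,  0, 0, 0,100, 0)
--     }
--     for key in result:
--         if key[1]:
--             return result[key]
-- ===== SOURCE B (Python) =====
-- def wealth_distribution_prct(time, interest, risk):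
--     risk_scale = {"1 (no risk)": 1,
--                   "2 (little risk)": 2,
--                   "3 (balanced risk)": 3,
--                   "4 (high risk high reward)": 4,
--                   "5 (I don't care if i loose everything)": 5}
--     r = risk_scale[risk]
--     BONDS = (0, 100, 0, 0, 0, 0)
--     CASH = (0, 0, 0, 0, 100, 0)
--     thresholds, rows = {
--         1: ([1], [CASH, BONDS]),
--         2: ([1, 11], [CASH, BONDS, (20, 40, 0, 40, 0, 0)]),
--         3: ([3, 4, 6], [BONDS, (0, 70, 0, 30, 0, 0),
--                         (30, 30, 0, 50, 0, 0), (50, 20, 0, 30, 0, 0)]),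
--         4: ([4, 6, 11], [BONDS, (0, 50, 0, 50, 0, 0),
--                          (50, 20, 0, 30, 0, 0), (70, 10, 0, 20, 0, 0)]),
--         5: ([4, 6], [BONDS, (0, 70, 10, 10, 10, 0),
--                      (70, 10, 5, 5, 0, 10) if interest > 10 else (80, 10, 0, 10, 0, 0)]),
--     }[r]
--     i = sum(time >= th for th in thresholds)
--     return rows[i]
-- ===== Notes on version B (the rewrite author's own statement) =====
-- stated objective: alternative
-- what changed: Replaces the 15-entry priority-ordered (id,bool)->tuple dict and first-true scan with per-risk ascending time-threshold tables: B counts how many thresholds time has crossed and indexes the row list directly, so there is no condition table and no priority scan.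
import Mathlib
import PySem

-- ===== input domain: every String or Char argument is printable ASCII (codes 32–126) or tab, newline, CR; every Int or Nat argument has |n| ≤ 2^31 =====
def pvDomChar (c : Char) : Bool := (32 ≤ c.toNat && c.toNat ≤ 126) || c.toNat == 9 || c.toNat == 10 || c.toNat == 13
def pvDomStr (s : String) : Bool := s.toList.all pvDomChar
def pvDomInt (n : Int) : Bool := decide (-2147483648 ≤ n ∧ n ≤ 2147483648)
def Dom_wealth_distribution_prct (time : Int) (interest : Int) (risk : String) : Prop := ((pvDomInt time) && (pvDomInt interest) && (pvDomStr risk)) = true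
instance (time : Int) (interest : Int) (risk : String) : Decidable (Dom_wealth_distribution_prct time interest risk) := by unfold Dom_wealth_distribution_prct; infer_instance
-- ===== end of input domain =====

-- B replaces A's 15-entry priority condition table and first-true scan by per-risk
-- ascending time-threshold tables: it counts the thresholds 'time' has crossed and
-- indexes the row list directly (alternative decomposition; same value everywhere
-- A returns).

-- ===== PORT A =====
-- A's risk_scale dict literal
def wdpRiskScale : PySem.Dict String Int := PySem.Dict.ofList
  [("1 (no risk)", 1), ("2 (little risk)", 2), ("3 (balanced risk)", 3),
   ("4 (high risk high reward)", 4), ("5 (I don't care if i loose everything)", 5)]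

-- A's 'result' dict: ids 1..15 are distinct, so the (id, bool)-keyed dict IS this
-- insertion-ordered association list
def wdpTable (r time interest : Int) : List ((Int × Bool) × List Int) :=
  [ ((1 , decide (5 = r) && decide (6 ≤ time) && decide (interest > 10)), [70, 10, 5, 5, 0, 10]),
    ((2 , decide (5 = r) && decide (6 ≤ time) && true)                  , [80, 10, 0, 10, 0, 0]),
    ((3 , decide (5 = r) && decide (4 ≤ time) && true)                  , [ 0, 70,10, 10,10, 0]),
    ((4 , decide (5 = r) && true              && true)                  , [ 0,100, 0,  0, 0, 0]),
    ((5 , decide (4 ≤ r) && decide (time > 10) && true)                 , [70, 10, 0, 20, 0, 0]),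
    ((6 , decide (4 ≤ r) && decide (6 ≤ time) && true)                  , [50, 20, 0, 30, 0, 0]),
    ((7 , decide (4 ≤ r) && decide (4 ≤ time) && true)                  , [ 0, 50, 0, 50, 0, 0]),
    ((8 , decide (4 ≤ r) && true              && true)                  , [ 0,100, 0,  0, 0, 0]),
    ((9 , decide (3 ≤ r) && decide (6 ≤ time) && true)                  , [50, 20, 0, 30, 0, 0]),
    ((10, decide (3 ≤ r) && decide (4 ≤ time) && true)                  , [30, 30, 0, 50, 0, 0]),
    ((11, decide (3 ≤ r) && decide (3 ≤ time) && true)                  , [ 0, 70, 0, 30, 0, 0]),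
    ((12, decide (3 ≤ r) && true              && true)                  , [ 0,100, 0,  0, 0, 0]),
    ((13, decide (2 ≤ r) && decide (10 < time) && true)                 , [20, 40, 0, 40, 0, 0]),
    ((14, true           && decide (time ≥ 1) && true)                  , [ 0,100, 0,  0, 0, 0]),
    ((15, true           && true              && true)                  , [ 0,  0, 0,  0,100, 0]) ]

-- the 'for key in result: if key[1]: return result[key]' loop (first true condition wins);
-- falls off the end → None, unreachable since the last key is True
def wdpLoop : List ((Int × Bool) × List Int) → List Int
  | [] => []
  | (k, v) :: rest => if k.2 then v else wdpLoop rest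

def wealth_distribution_prct (time : Int) (interest : Int) (risk : String) : List Int :=
  match wdpRiskScale.get? risk with
  | none => []   -- Python raises KeyError here; excluded by Pre_
  | some r => wdpLoop (wdpTable r time interest)

-- ===== PORT B =====
-- Source B's own risk_scale dict literal (textually identical to A's)
def wdpRiskScaleB : PySem.Dict String Int := PySem.Dict.ofList
  [("1 (no risk)", 1), ("2 (little risk)", 2), ("3 (balanced risk)", 3),
   ("4 (high risk high reward)", 4), ("5 (I don't care if i loose everything)", 5)]

-- Source B's per-risk dict: ascending time thresholds and the row list
def wdpTables (interest : Int) : PySem.Dict Int (List Int × List (List Int)) :=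
  PySem.Dict.ofList
    [ (1, ([1], [[0, 0, 0, 0, 100, 0], [0, 100, 0, 0, 0, 0]])),
      (2, ([1, 11], [[0, 0, 0, 0, 100, 0], [0, 100, 0, 0, 0, 0], [20, 40, 0, 40, 0, 0]])),
      (3, ([3, 4, 6], [[0, 100, 0, 0, 0, 0], [0, 70, 0, 30, 0, 0],
                       [30, 30, 0, 50, 0, 0], [50, 20, 0, 30, 0, 0]])),
      (4, ([4, 6, 11], [[0, 100, 0, 0, 0, 0], [0, 50, 0, 50, 0, 0],
                        [50, 20, 0, 30, 0, 0], [70, 10, 0, 20, 0, 0]])),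
      (5, ([4, 6], [[0, 100, 0, 0, 0, 0], [0, 70, 10, 10, 10, 0],
                    if interest > 10 then [70, 10, 5, 5, 0, 10] else [80, 10, 0, 10, 0, 0]])) ]

-- 'i = sum(time >= th for th in thresholds)'
def wdpCount (time : Int) (ths : List Int) : Int :=
  ths.foldl (fun acc th => acc + (if time ≥ th then 1 else 0)) 0

def wealth_distribution_prct_alt (time : Int) (interest : Int) (risk : String) : List Int :=
  match wdpRiskScaleB.get? risk with
  | none => []   -- Python raises KeyError here; excluded by Pre_
  | some r =>
    match (wdpTables interest).get? r with
    | none => []   -- unreachable: r ∈ {1..5}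
    | some (ths, rows) =>
      match PySem.List.pyGet? rows (wdpCount time ths) with
      | none => []   -- unreachable: 0 ≤ count ≤ ths.length < rows.length
      | some row => row

-- ===== PRECONDITION & SPEC =====
-- Pre_ excludes exactly the risk strings outside the risk_scale dict, on which A raises KeyError.
def Pre_wealth_distribution_prct (time : Int) (interest : Int) (risk : String) : Prop :=
  risk = "1 (no risk)" ∨ risk = "2 (little risk)" ∨ risk = "3 (balanced risk)" ∨
  risk = "4 (high risk high reward)" ∨ risk = "5 (I don't care if i loose everything)"
instance (time : Int) (interest : Int) (risk : String) : Decidable (Pre_wealth_distribution_prct time interest risk) := by unfold Pre_wealth_distribution_prct; infer_instance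

def pvWitness_wealth_distribution_prct : Int × Int × String := (7, 12, "5 (I don't care if i loose everything)")

def Spec_wealth_distribution_prct (time : Int) (interest : Int) (risk : String) (out : List Int) : Prop := out = wealth_distribution_prct_alt time interest risk
instance (time : Int) (interest : Int) (risk : String) (out : List Int) : Decidable (Spec_wealth_distribution_prct time interest risk out) := by unfold Spec_wealth_distribution_prct; infer_instance

-- ===== CLAIM (what is proved, stated in full; the proofs are below) =====
def Claim_equal_wealth_distribution_prct : Prop := ∀ (time : Int) (interest : Int) (risk : String), Dom_wealth_distribution_prct time interest risk → Pre_wealth_distribution_prct time interest risk → Spec_wealth_distribution_prct time interest risk (wealth_distribution_prct time interest risk)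

-- ===== LEMMAS AND PROOFS =====
-- one lemma per risk level: A's scan over its table = B's threshold count + index
theorem wdp_case1 (time interest : Int) :
    wdpLoop (wdpTable 1 time interest) =
    (match (wdpTables interest).get? 1 with
     | none => ([] : List Int)
     | some (ths, rows) =>
       match PySem.List.pyGet? rows (wdpCount time ths) with
       | none => []
       | some row => row) := by
  rw [show (wdpTables interest).get? 1 = some ([1],
      [[0, 0, 0, 0, 100, 0], [0, 100, 0, 0, 0, 0]]) from rfl]
  simp only [wdpTable, wdpLoop, wdpCount, List.foldl]
  norm_num
  split_ifs <;> first | rfl | omega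

theorem wdp_case2 (time interest : Int) :
    wdpLoop (wdpTable 2 time interest) =
    (match (wdpTables interest).get? 2 with
     | none => ([] : List Int)
     | some (ths, rows) =>
       match PySem.List.pyGet? rows (wdpCount time ths) with
       | none => []
       | some row => row) := by
  rw [show (wdpTables interest).get? 2 = some ([1, 11],
      [[0, 0, 0, 0, 100, 0], [0, 100, 0, 0, 0, 0], [20, 40, 0, 40, 0, 0]]) from rfl]
  simp only [wdpTable, wdpLoop, wdpCount, List.foldl]
  norm_num
  split_ifs <;> first | rfl | omega

theorem wdp_case3 (time interest : Int) :
    wdpLoop (wdpTable 3 time interest) =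
    (match (wdpTables interest).get? 3 with
     | none => ([] : List Int)
     | some (ths, rows) =>
       match PySem.List.pyGet? rows (wdpCount time ths) with
       | none => []
       | some row => row) := by
  rw [show (wdpTables interest).get? 3 = some ([3, 4, 6],
      [[0, 100, 0, 0, 0, 0], [0, 70, 0, 30, 0, 0],
       [30, 30, 0, 50, 0, 0], [50, 20, 0, 30, 0, 0]]) from rfl]
  simp only [wdpTable, wdpLoop, wdpCount, List.foldl]
  norm_num
  split_ifs <;> first | rfl | omega

theorem wdp_case4 (time interest : Int) :
    wdpLoop (wdpTable 4 time interest) =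
    (match (wdpTables interest).get? 4 with
     | none => ([] : List Int)
     | some (ths, rows) =>
       match PySem.List.pyGet? rows (wdpCount time ths) with
       | none => []
       | some row => row) := by
  rw [show (wdpTables interest).get? 4 = some ([4, 6, 11],
      [[0, 100, 0, 0, 0, 0], [0, 50, 0, 50, 0, 0],
       [50, 20, 0, 30, 0, 0], [70, 10, 0, 20, 0, 0]]) from rfl]
  simp only [wdpTable, wdpLoop, wdpCount, List.foldl]
  norm_num
  split_ifs <;> first | rfl | omega

theorem wdp_case5 (time interest : Int) :
    wdpLoop (wdpTable 5 time interest) =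
    (match (wdpTables interest).get? 5 with
     | none => ([] : List Int)
     | some (ths, rows) =>
       match PySem.List.pyGet? rows (wdpCount time ths) with
       | none => []
       | some row => row) := by
  rw [show (wdpTables interest).get? 5 = some ([4, 6],
      [[0, 100, 0, 0, 0, 0], [0, 70, 10, 10, 10, 0],
       if interest > 10 then [70, 10, 5, 5, 0, 10] else [80, 10, 0, 10, 0, 0]]) from rfl]
  simp only [wdpTable, wdpLoop, wdpCount, List.foldl]
  norm_num
  split_ifs <;> first | rfl | omega

-- ===== VERDICT (by name: the statement is the Claim_ definition above) =====
theorem wealth_distribution_prct_spec : Claim_equal_wealth_distribution_prct := by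
  intro time interest risk _ hpre
  unfold Spec_wealth_distribution_prct
  simp only [wealth_distribution_prct, wealth_distribution_prct_alt]
  rcases hpre with h | h | h | h | h <;> subst h
  · rw [show wdpRiskScale.get? "1 (no risk)" = some 1 from by decide,
        show wdpRiskScaleB.get? "1 (no risk)" = some 1 from by decide]
    exact wdp_case1 time interest
  · rw [show wdpRiskScale.get? "2 (little risk)" = some 2 from by decide,
        show wdpRiskScaleB.get? "2 (little risk)" = some 2 from by decide]
    exact wdp_case2 time interest
  · rw [show wdpRiskScale.get? "3 (balanced risk)" = some 3 from by decide,
        show wdpRiskScaleB.get? "3 (balanced risk)" = some 3 from by decide]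
    exact wdp_case3 time interest
  · rw [show wdpRiskScale.get? "4 (high risk high reward)" = some 4 from by decide,
        show wdpRiskScaleB.get? "4 (high risk high reward)" = some 4 from by decide]
    exact wdp_case4 time interest
  · rw [show wdpRiskScale.get? "5 (I don't care if i loose everything)" = some 5 from by decide,
        show wdpRiskScaleB.get? "5 (I don't care if i loose everything)" = some 5 from by decide]
    exact wdp_case5 time interest
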